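-- pv_equiv track=rewrite | github.com/aitorlarrinoa/Diseno-Algoritmos | Prácticas/Práctica IV/Code/Practica IV.py | InicioMasTarde
-- ===== SOURCE A (Python) =====
-- def InicioMasTarde(Peliculas, ListaFechas):
--     eleccion = -999999999
--     film = ''
--     fechas = ''
--     i = 0
--     for x0,xF in ListaFechas:
--         if x0 > eleccion:
--             eleccion = x0
--             film = Peliculas[i]
--             fechas = (x0,xF)
--         i += 1
--     return film, fechas
-- ===== SOURCE B (Python) =====
-- def InicioMasTarde(Peliculas, ListaFechas):
--     records = [(Peliculas[i], fechas) for i, fechas in enumerate(ListaFechas)]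
--     ordenadas = sorted(records, key=lambda r: r[1][0], reverse=True)
--     return ordenadas[0]
-- ===== Notes on version B (the rewrite author's own statement) =====
-- stated objective: alternative
-- what changed: Replaces the sentinel-initialised running-max loop with building (film, fechas) records and taking the head of a stable descending sort by start time (stability yields the same first-occurrence tie-breaking).
-- outside the precondition, e.g. on InicioMasTarde(['a'], [(5, 6), (1, 2)]): A returns ('a', (5, 6)), B raises IndexError; on InicioMasTarde(['a'], [(-2000000000, 0)]): A returns ('', ''), B returns ('a', (-2000000000, 0)); on InicioMasTarde([], []): A returns ('', ''), B raises IndexError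
import Mathlib
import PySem

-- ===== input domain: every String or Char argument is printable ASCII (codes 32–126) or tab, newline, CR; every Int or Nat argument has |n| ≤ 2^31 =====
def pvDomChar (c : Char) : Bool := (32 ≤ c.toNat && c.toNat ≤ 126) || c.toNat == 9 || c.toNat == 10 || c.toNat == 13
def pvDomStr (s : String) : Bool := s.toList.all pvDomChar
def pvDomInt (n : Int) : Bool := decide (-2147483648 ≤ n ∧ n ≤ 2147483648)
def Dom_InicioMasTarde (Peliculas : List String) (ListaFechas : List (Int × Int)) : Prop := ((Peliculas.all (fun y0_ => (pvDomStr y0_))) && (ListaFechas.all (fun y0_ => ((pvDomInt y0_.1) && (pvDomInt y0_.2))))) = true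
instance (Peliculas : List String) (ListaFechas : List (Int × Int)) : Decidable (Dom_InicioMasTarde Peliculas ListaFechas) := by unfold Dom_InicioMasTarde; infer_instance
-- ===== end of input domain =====

-- B replaces A's sentinel-initialised running-max loop with "build records, stable-sort descending by start, take the head"
-- (alternative decomposition; return value only, neither version mutates its arguments).

-- ===== PORT A =====
-- state = (eleccion, film, fechas, i); Python's fechas starts as '' (no pair yet), ported as Option;
-- Peliculas[i] is PySem.List.pyGet? (IndexError = none, excluded by Pre_; .getD supplies a dummy there).
def pvLoopA (Peliculas : List String) (ListaFechas : List (Int × Int)) :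
    Int × String × Option (Int × Int) × Int :=
  ListaFechas.foldl
    (fun (st : Int × String × Option (Int × Int) × Int) p =>
      if p.1 > st.1 then (p.1, (PySem.List.pyGet? Peliculas st.2.2.2).getD "", some p, st.2.2.2 + 1)
      else (st.1, st.2.1, st.2.2.1, st.2.2.2 + 1))
    (-999999999, "", none, 0)

def InicioMasTarde (Peliculas : List String) (ListaFechas : List (Int × Int)) : String × (Int × Int) :=
  ((pvLoopA Peliculas ListaFechas).2.1, (pvLoopA Peliculas ListaFechas).2.2.1.getD (0, 0))

-- ===== PORT B =====
def pvRecords (Peliculas : List String) (ListaFechas : List (Int × Int)) :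
    List (String × (Int × Int)) :=
  (PySem.List.enumerate ListaFechas).map
    (fun ip => ((PySem.List.pyGet? Peliculas ip.1).getD "", ip.2))

def InicioMasTarde_alt (Peliculas : List String) (ListaFechas : List (Int × Int)) : String × (Int × Int) :=
  (PySem.List.pyGet? (PySem.List.sorted (pvRecords Peliculas ListaFechas) (fun r => r.2.1) true) 0).getD ("", (0, 0))

-- ===== PRECONDITION & SPEC =====
-- Pre_ excludes (a) inputs where Python A raises IndexError (an updating index beyond Peliculas; the
-- length bound is slightly wider: it also drops runs where an out-of-range index is never reached),
-- and (b) inputs on which every start time is ≤ -999999999, where A's sentinel never updates and A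
-- returns fechas = '' — a string where a pair is expected, outside the declared return type.
def Pre_InicioMasTarde (Peliculas : List String) (ListaFechas : List (Int × Int)) : Prop :=
  ListaFechas.length ≤ Peliculas.length ∧ ∃ p ∈ ListaFechas, -999999999 < p.1
instance (Peliculas : List String) (ListaFechas : List (Int × Int)) : Decidable (Pre_InicioMasTarde Peliculas ListaFechas) := by unfold Pre_InicioMasTarde; infer_instance

def pvWitness_InicioMasTarde : List String × (List (Int × Int)) := (["a", "b"], [(1, 2), (3, 4)])

def Spec_InicioMasTarde (Peliculas : List String) (ListaFechas : List (Int × Int)) (out : String × (Int × Int)) : Prop := out = InicioMasTarde_alt Peliculas ListaFechas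
instance (Peliculas : List String) (ListaFechas : List (Int × Int)) (out : String × (Int × Int)) : Decidable (Spec_InicioMasTarde Peliculas ListaFechas out) := by unfold Spec_InicioMasTarde; infer_instance

-- ===== CLAIM (what is proved, stated in full; the proofs are below) =====
def Claim_equal_InicioMasTarde : Prop := ∀ (Peliculas : List String) (ListaFechas : List (Int × Int)), Dom_InicioMasTarde Peliculas ListaFechas → Pre_InicioMasTarde Peliculas ListaFechas → Spec_InicioMasTarde Peliculas ListaFechas (InicioMasTarde Peliculas ListaFechas)

-- ===== LEMMAS AND PROOFS =====

-- The record list B builds, written structurally (index carried as Int, as in both ports).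
def pvRecs (Peliculas : List String) : Int → List (Int × Int) → List (String × (Int × Int))
  | _, [] => []
  | i, p :: L => ((PySem.List.pyGet? Peliculas i).getD "", p) :: pvRecs Peliculas (i + 1) L

-- "keep unless strictly later start": the running first-occurrence max on records.
def pvStep (b r : String × (Int × Int)) : String × (Int × Int) :=
  if b.2.1 < r.2.1 then r else b

lemma pvRecs_enum (Peliculas : List String) :
    ∀ (L : List (Int × Int)) (i : Int),
      (PySem.List.enumerate L i).map (fun ip => ((PySem.List.pyGet? Peliculas ip.1).getD "", ip.2))
        = pvRecs Peliculas i L := by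
  intro L
  induction L with
  | nil => intro i; simp [PySem.List.enumerate_nil, pvRecs]
  | cons p L ih => intro i; simp [PySem.List.enumerate_cons, pvRecs, ih]

lemma pvInsertBy_nil {α : Type} (before : α → α → Bool) (x : α) :
    PySem.List.insertBy before x [] = [x] := by
  simpa using PySem.List.insertBy_of_forall_not_before before x [] (by simp)

lemma pvInsertBy_cons {α : Type} (before : α → α → Bool) (x a : α) (t : List α) :
    PySem.List.insertBy before x (a :: t)
      = if before x a then x :: a :: t else a :: PySem.List.insertBy before x t := by
  simp [PySem.List.insertBy]

-- head of the reverse insertion-sort fold = running strict max, first occurrence kept.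
lemma pvIns_head :
    ∀ (xs : List (String × (Int × Int))) (a : String × (Int × Int)) (t : List (String × (Int × Int))),
      (List.foldl (fun acc x => PySem.List.insertBy (fun p q => decide (q.2.1 < p.2.1)) x acc) (a :: t) xs).head?
        = some (xs.foldl pvStep a) := by
  intro xs
  induction xs with
  | nil => intro a t; simp
  | cons x xs ih =>
    intro a t
    simp only [List.foldl_cons, pvInsertBy_cons]
    by_cases h : a.2.1 < x.2.1
    · simp [pvStep, h, ih]
    · simp [pvStep, h, ih]

-- lockstep: once A's state holds a genuine record b, A's loop is the running strict max over pvRecs.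
lemma pvLockstep (Peliculas : List String) :
    ∀ (L : List (Int × Int)) (i : Int) (b : String × (Int × Int)),
      List.foldl
        (fun (st : Int × String × Option (Int × Int) × Int) p =>
          if p.1 > st.1 then (p.1, (PySem.List.pyGet? Peliculas st.2.2.2).getD "", some p, st.2.2.2 + 1)
          else (st.1, st.2.1, st.2.2.1, st.2.2.2 + 1))
        (b.2.1, b.1, some b.2, i) L
      = (((pvRecs Peliculas i L).foldl pvStep b).2.1,
         ((pvRecs Peliculas i L).foldl pvStep b).1,
         some ((pvRecs Peliculas i L).foldl pvStep b).2,
         i + L.length) := by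
  intro L
  induction L with
  | nil => intro i b; simp [pvRecs]
  | cons p L ih =>
    intro i b
    simp only [List.foldl_cons, pvRecs]
    by_cases h : p.1 > b.2.1
    · have hrec : pvStep b ((PySem.List.pyGet? Peliculas i).getD "", p)
          = ((PySem.List.pyGet? Peliculas i).getD "", p) := by simp [pvStep]; omega
      simp only [if_pos h, hrec]
      have h2 := ih (i + 1) ((PySem.List.pyGet? Peliculas i).getD "", p)
      (try dsimp only at h2)
      rw [h2]
      refine Prod.ext rfl (Prod.ext rfl (Prod.ext rfl ?_))
      simp only [List.length_cons]
      push_cast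
      ring
    · have hrec : pvStep b ((PySem.List.pyGet? Peliculas i).getD "", p) = b := by
        simp [pvStep]; omega
      simp only [if_neg h, hrec]
      have h2 := ih (i + 1) b
      rw [h2]
      refine Prod.ext rfl (Prod.ext rfl (Prod.ext rfl ?_))
      simp only [List.length_cons]
      push_cast
      ring

-- sentinel phase: while the sentinel is still in charge, A agrees with the running max seeded by any
-- already-seen record of start ≤ sentinel, provided some later start beats the sentinel.
lemma pvSentinel (Peliculas : List String) :
    ∀ (L : List (Int × Int)) (i : Int) (b : String × (Int × Int)),
      b.2.1 ≤ -999999999 → (∃ p ∈ L, -999999999 < p.1) →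
      List.foldl
        (fun (st : Int × String × Option (Int × Int) × Int) p =>
          if p.1 > st.1 then (p.1, (PySem.List.pyGet? Peliculas st.2.2.2).getD "", some p, st.2.2.2 + 1)
          else (st.1, st.2.1, st.2.2.1, st.2.2.2 + 1))
        (-999999999, "", none, i) L
      = (((pvRecs Peliculas i L).foldl pvStep b).2.1,
         ((pvRecs Peliculas i L).foldl pvStep b).1,
         some ((pvRecs Peliculas i L).foldl pvStep b).2,
         i + L.length) := by
  intro L
  induction L with
  | nil => intro i b _ h; simp at h
  | cons p L ih =>
    intro i b hb h
    simp only [List.foldl_cons, pvRecs]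
    by_cases hp : p.1 > (-999999999 : Int)
    · have h1 : b.2.1 < p.1 := lt_of_le_of_lt hb hp
      have hrec : pvStep b ((PySem.List.pyGet? Peliculas i).getD "", p)
          = ((PySem.List.pyGet? Peliculas i).getD "", p) := by simp [pvStep, h1]
      simp only [if_pos hp, hrec]
      have h2 := pvLockstep Peliculas L (i + 1) ((PySem.List.pyGet? Peliculas i).getD "", p)
      (try dsimp only at h2)
      rw [h2]
      refine Prod.ext rfl (Prod.ext rfl (Prod.ext rfl ?_))
      simp only [List.length_cons]
      push_cast
      ring
    · have h1 : ¬ p.1 > (-999999999 : Int) := hp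
      have h2 : (pvStep b ((PySem.List.pyGet? Peliculas i).getD "", p)).2.1 ≤ -999999999 := by
        by_cases hc : b.2.1 < p.1 <;> simp [pvStep, hc] <;> omega
      have h3 : ∃ q ∈ L, -999999999 < q.1 := by
        rcases h with ⟨q, hq, hq1⟩
        rcases List.mem_cons.mp hq with rfl | hq'
        · exact absurd hq1 hp
        · exact ⟨q, hq', hq1⟩
      simp only [if_neg h1]
      have h4 := ih (i + 1) (pvStep b ((PySem.List.pyGet? Peliculas i).getD "", p)) h2 h3
      rw [h4]
      refine Prod.ext rfl (Prod.ext rfl (Prod.ext rfl ?_))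
      simp only [List.length_cons]
      push_cast
      ring

-- ===== VERDICT (by name: the statement is the Claim_ definition above) =====
theorem InicioMasTarde_spec : Claim_equal_InicioMasTarde := by
  intro Peliculas ListaFechas _ hpre
  rcases hpre with ⟨_, hex⟩
  unfold Spec_InicioMasTarde InicioMasTarde InicioMasTarde_alt pvLoopA pvRecords
  rw [pvRecs_enum, PySem.List.sorted_rev_eq_foldl_insertBy]
  cases ListaFechas with
  | nil => simp at hex
  | cons p L =>
    simp only [pvRecs, List.foldl_cons, pvInsertBy_nil, zero_add]
    have hhead := pvIns_head (pvRecs Peliculas 1 L) ((PySem.List.pyGet? Peliculas 0).getD "", p) []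
    rcases List.head?_eq_some_iff.mp hhead with ⟨t, ht⟩
    rw [ht]
    by_cases hp : p.1 > (-999999999 : Int)
    · have hA := pvLockstep Peliculas L 1 ((PySem.List.pyGet? Peliculas 0).getD "", p)
      dsimp only at hA ⊢
      simp only [if_pos hp]
      rw [hA]
      simp [PySem.List.pyGet?, PySem.List.pyIdx?]
    · have h3 : ∃ q ∈ L, -999999999 < q.1 := by
        rcases hex with ⟨q, hq, hq1⟩
        rcases List.mem_cons.mp hq with rfl | hq'
        · exact absurd hq1 hp
        · exact ⟨q, hq', hq1⟩
      have hb : (((PySem.List.pyGet? Peliculas 0).getD "", p) : String × (Int × Int)).2.1 ≤ -999999999 := by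
        simpa using not_lt.mp hp
      have hA := pvSentinel Peliculas L 1 ((PySem.List.pyGet? Peliculas 0).getD "", p) hb h3
      simp only [if_neg hp]
      rw [hA]
      simp [PySem.List.pyGet?, PySem.List.pyIdx?]
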